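-- pv_equiv track=rewrite | github.com/blopker/djdt-flamegraph | djdt_flamegraph/djdt_flamegraph.py | split_outliers
-- ===== SOURCE A (Python) =====
-- def split_outliers(numbers):
--     numbers = sorted(numbers)
--     outliers = []
--     if len(numbers) < 10:
--         return numbers, outliers
--     q1 = numbers[len(numbers) // 4]
--     q3 = numbers[len(numbers) * 3 // 4]
--     iqr = q3 - q1
--     f = 15  # usually 1.5 but I want fewer outliers -- only those that are seriously out there
--     min_x = q1 - f * iqr
--     max_x = q3 + f * iqr
--     outliers = [x for x in numbers if x < min_x or x > max_x]
--     numbers = [x for x in numbers if min_x <= x <= max_x]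
--     return numbers, outliers
-- ===== SOURCE B (Python) =====
-- def split_outliers(numbers):
--     numbers = sorted(numbers)
--     n = len(numbers)
--     if n < 10:
--         return numbers, []
--     q1 = numbers[n // 4]
--     q3 = numbers[n * 3 // 4]
--     iqr = q3 - q1
--     f = 15  # same widening factor as before
--     min_x = q1 - f * iqr
--     max_x = q3 + f * iqr
--     # binary-search the two cut points of the inlier band instead of scanning
--     lo = _boundary(numbers, lambda v: v < min_x)
--     hi = _boundary(numbers, lambda v: v <= max_x)
--     return numbers[lo:hi], numbers[:lo] + numbers[hi:]
--
--
-- def _boundary(a, pred):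
--     """First index whose element fails pred, found by binary search
--     (pred holds on a prefix of the sorted list a)."""
--     lo, hi = 0, len(a)
--     while lo < hi:
--         mid = (lo + hi) // 2
--         if pred(a[mid]):
--             lo = mid + 1
--         else:
--             hi = mid
--     return lo
-- ===== Notes on version B (the rewrite author's own statement) =====
-- stated objective: alternative
-- what changed: After sorting, B locates the two boundaries of the inlier band by binary search and returns slices/concatenations of the sorted list, instead of A's two full linear filtering passes.
import Mathlib
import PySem

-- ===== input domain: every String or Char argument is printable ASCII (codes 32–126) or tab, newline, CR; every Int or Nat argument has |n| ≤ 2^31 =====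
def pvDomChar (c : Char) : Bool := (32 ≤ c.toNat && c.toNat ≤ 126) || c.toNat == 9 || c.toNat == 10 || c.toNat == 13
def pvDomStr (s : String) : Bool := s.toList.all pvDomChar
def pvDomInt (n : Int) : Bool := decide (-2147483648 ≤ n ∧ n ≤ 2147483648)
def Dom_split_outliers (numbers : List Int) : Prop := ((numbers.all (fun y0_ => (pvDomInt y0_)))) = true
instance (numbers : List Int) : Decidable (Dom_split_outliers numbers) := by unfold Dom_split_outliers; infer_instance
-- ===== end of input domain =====

-- B replaces A's two linear filtering passes by a binary search for the two cut
-- points of the inlier band and returns slices of the sorted list (alternative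
-- algorithm; the sort dominates both, so no speed is claimed).

-- ===== PORT A =====
def split_outliers (numbers : List Int) : List Int × List Int :=
  let ns := PySem.List.sorted numbers (fun x => x) false
  if ns.length < 10 then (ns, []) else
  -- the quartile indices are always in range (length ≥ 10), so the default of
  -- pyGetD is never used
  let q1 := PySem.List.pyGetD ns (PySem.Int.floordiv (ns.length : Int) 4) 0
  let q3 := PySem.List.pyGetD ns (PySem.Int.floordiv ((ns.length : Int) * 3) 4) 0
  let iqr := q3 - q1
  let f : Int := 15
  let min_x := q1 - f * iqr
  let max_x := q3 + f * iqr
  let outliers := ns.filter (fun x => decide (x < min_x) || decide (max_x < x))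
  let inliers := ns.filter (fun x => decide (min_x ≤ x) && decide (x ≤ max_x))
  (inliers, outliers)

-- ===== PORT B =====
-- the while-loop of Source B's _boundary, with fuel = initial hi - lo (the loop
-- shrinks hi - lo every iteration, so the fuel is never exhausted)
def boundaryLoop (pred : Int → Bool) (a : List Int) : Nat → Nat → Nat → Nat
  | 0, lo, _ => lo
  | fuel + 1, lo, hi =>
    if lo < hi then
      let mid := (lo + hi) / 2
      -- a[mid] is always in range (lo ≤ mid < hi ≤ len a), so getD's default is never used
      if pred (a.getD mid 0) then boundaryLoop pred a fuel (mid + 1) hi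
      else boundaryLoop pred a fuel lo mid
    else lo

-- Source B's _boundary(a, pred): first index whose element fails pred, by binary search
def boundary (a : List Int) (pred : Int → Bool) : Nat :=
  boundaryLoop pred a a.length 0 a.length

def split_outliers_alt (numbers : List Int) : List Int × List Int :=
  let ns := PySem.List.sorted numbers (fun x => x) false
  let n := ns.length
  if n < 10 then (ns, []) else
  -- indices always in range (n ≥ 10): pyGetD's default is never used
  let q1 := PySem.List.pyGetD ns (PySem.Int.floordiv (n : Int) 4) 0
  let q3 := PySem.List.pyGetD ns (PySem.Int.floordiv ((n : Int) * 3) 4) 0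
  let iqr := q3 - q1
  let f : Int := 15
  let min_x := q1 - f * iqr
  let max_x := q3 + f * iqr
  let lo := boundary ns (fun v => decide (v < min_x))
  let hi := boundary ns (fun v => decide (v ≤ max_x))
  (PySem.List.slice ns (some (lo : Int)) (some (hi : Int)),
   PySem.List.slice ns none (some (lo : Int)) ++ PySem.List.slice ns (some (hi : Int)) none)

-- ===== PRECONDITION & SPEC =====
def Spec_split_outliers (numbers : List Int) (out : List Int × List Int) : Prop := out = split_outliers_alt numbers
instance (numbers : List Int) (out : List Int × List Int) : Decidable (Spec_split_outliers numbers out) := by unfold Spec_split_outliers; infer_instance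

-- ===== CLAIM (what is proved, stated in full; the proofs are below) =====
def Claim_equal_split_outliers : Prop := ∀ (numbers : List Int), Dom_split_outliers numbers → Spec_split_outliers numbers (split_outliers numbers)

-- ===== LEMMAS AND PROOFS =====

-- A predicate that is downward closed along ≤ holds on a prefix of a sorted
-- list: the first countP p elements satisfy p, the rest fail it.
theorem take_countP_of_sorted (p : Int → Bool)
    (hdown : ∀ a b : Int, a ≤ b → p b = true → p a = true) :
    ∀ s : List Int, s.Pairwise (· ≤ ·) →
      s.take (s.countP p) = s.filter p ∧ s.drop (s.countP p) = s.filter (fun x => !(p x)) := by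
  intro s hs
  induction s with
  | nil => simp
  | cons h t ih =>
    rcases List.pairwise_cons.mp hs with ⟨hle, ht⟩
    rcases ih ht with ⟨iht, ihd⟩
    by_cases hp : p h = true
    · rw [List.countP_cons_of_pos hp]
      simp [hp, iht, ihd]
    · have hall : ∀ a ∈ t, ¬ p a = true := by
        intro a ha hpa
        exact hp (hdown h a (hle a ha) hpa)
      have hc0 : t.countP p = 0 := List.countP_eq_zero.mpr hall
      have hcc : (h :: t).countP p = 0 := by
        rw [List.countP_cons_of_neg (by simp [hp]), hc0]
      rw [hcc]
      constructor
      · simp [hp, List.filter_eq_nil_iff.mpr hall]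
      · simp only [List.drop_zero]
        rw [List.filter_cons]
        simp only [hp, Bool.not_false, if_pos]
        rw [List.filter_eq_self.mpr (by intro a ha; simp [hall a ha])]

-- index characterisation: on a sorted list, s[i] satisfies p iff i < countP p s
theorem getD_countP_iff (p : Int → Bool)
    (hdown : ∀ a b : Int, a ≤ b → p b = true → p a = true)
    (s : List Int) (hs : s.Pairwise (· ≤ ·)) (i : Nat) (hi : i < s.length) :
    (p (s.getD i 0) = true ↔ i < s.countP p) := by
  rcases take_countP_of_sorted p hdown s hs with ⟨ht, hd⟩
  have hget : s.getD i 0 = s[i] := List.getD_eq_getElem s 0 hi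
  constructor
  · intro hpi
    by_contra hge
    rw [Nat.not_lt] at hge
    have hlen : i - s.countP p < (s.drop (s.countP p)).length := by
      simp only [List.length_drop]; omega
    have h1 : (s.drop (s.countP p))[i - s.countP p]'hlen ∈ s.drop (s.countP p) :=
      List.getElem_mem hlen
    have h2 : (s.drop (s.countP p))[i - s.countP p]'hlen = s[i] := by
      rw [List.getElem_drop]
      congr 1
      omega
    have h3 : s[i] ∈ List.drop (s.countP p) s := h2 ▸ h1
    rw [hd] at h3
    have := (List.mem_filter.mp h3).2
    rw [hget] at hpi
    simp [hpi] at this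
  · intro hlt
    have hmem : s[i] ∈ s.take (s.countP p) :=
      List.mem_take_iff_getElem.mpr ⟨i, by simp [hi]; omega, rfl⟩
    rw [ht] at hmem
    rw [hget]
    exact (List.mem_filter.mp hmem).2

theorem boundaryLoop_eq (p : Int → Bool)
    (hdown : ∀ a b : Int, a ≤ b → p b = true → p a = true)
    (s : List Int) (hs : s.Pairwise (· ≤ ·)) :
    ∀ fuel lo hi, lo ≤ s.countP p → s.countP p ≤ hi → hi ≤ s.length →
      hi - lo ≤ fuel → boundaryLoop p s fuel lo hi = s.countP p := by
  intro fuel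
  induction fuel with
  | zero => intro lo hi h1 h2 h3 h4; simp [boundaryLoop]; omega
  | succ f ih =>
    intro lo hi h1 h2 h3 h4
    by_cases hlt : lo < hi
    · have hmid : (lo + hi) / 2 < s.length := by omega
      have hiff := getD_countP_iff p hdown s hs ((lo + hi) / 2) hmid
      by_cases hp : p (s.getD ((lo + hi) / 2) 0) = true
      · have := hiff.mp hp
        simp only [boundaryLoop, if_pos hlt, hp, if_pos]
        exact ih _ _ (by omega) h2 h3 (by omega)
      · have : ¬ ((lo + hi) / 2 < s.countP p) := fun h => hp (hiff.mpr h)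
        simp only [boundaryLoop, if_pos hlt, hp, if_neg, Bool.false_eq_true, not_false_iff]
        exact ih _ _ h1 (by omega) (by omega) (by omega)
    · simp [boundaryLoop, hlt]; omega

theorem boundary_eq (p : Int → Bool)
    (hdown : ∀ a b : Int, a ≤ b → p b = true → p a = true)
    (s : List Int) (hs : s.Pairwise (· ≤ ·)) :
    boundary s p = s.countP p :=
  boundaryLoop_eq p hdown s hs s.length 0 s.length (Nat.zero_le _)
    List.countP_le_length (le_refl _) (by omega)

-- a downward-closed p and an upward-closed q that never hold together split a
-- sorted list's filter of (p or q) into two consecutive blocks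
theorem filter_or_append (p q : Int → Bool)
    (hdown : ∀ a b : Int, a ≤ b → p b = true → p a = true)
    (hdisj : ∀ x, p x = true → q x = false) :
    ∀ s : List Int, s.Pairwise (· ≤ ·) →
      s.filter (fun x => p x || q x) = s.filter p ++ s.filter q := by
  intro s hs
  induction s with
  | nil => simp
  | cons h t ih =>
    rcases List.pairwise_cons.mp hs with ⟨hle, ht⟩
    by_cases hp : p h = true
    · simp [hp, hdisj h hp, ih ht]
    · have hall : ∀ a ∈ t, ¬ p a = true := fun a ha hpa => hp (hdown h a (hle a ha) hpa)
      have hnilp : (h :: t).filter p = [] :=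
        List.filter_eq_nil_iff.mpr (by
          intro a ha
          rcases List.mem_cons.mp ha with rfl | ha'
          · simp [hp]
          · exact hall a ha')
      rw [hnilp, List.nil_append]
      apply List.filter_congr
      intro x hx
      rcases List.mem_cons.mp hx with rfl | hx'
      · simp [hp]
      · simp [hall x hx']

theorem countP_or_split (p q : Int → Bool) (himp : ∀ x, p x = true → q x = true) :
    ∀ s : List Int, s.countP q = s.countP p + s.countP (fun x => q x && !(p x)) := by
  intro s
  induction s with
  | nil => simp
  | cons h t ih =>
    by_cases hp : p h = true
    · simp [hp, himp h hp, ih]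
      omega
    · simp [List.countP_cons, hp, ih]
      by_cases hq : q h = true <;> simp [hq] <;> omega

theorem getD_mono (s : List Int) (hs : s.Pairwise (· ≤ ·)) (i j : Nat)
    (hij : i ≤ j) (hj : j < s.length) : s.getD i 0 ≤ s.getD j 0 := by
  rcases Nat.lt_or_eq_of_le hij with hlt | rfl
  · rw [List.getD_eq_getElem s 0 (by omega), List.getD_eq_getElem s 0 hj]
    exact List.pairwise_iff_getElem.mp hs i j (by omega) hj hlt
  · exact le_refl _

theorem floordiv_nat4 (m : Nat) :
    PySem.Int.floordiv (m : Int) 4 = ((m / 4 : Nat) : Int) := by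
  simp [PySem.Int.floordiv]
  exact_mod_cast (Int.ofNat_fdiv m 4).symm

-- ===== VERDICT (by name: the statement is the Claim_ definition above) =====
theorem split_outliers_spec : Claim_equal_split_outliers := by
  intro numbers _
  unfold Spec_split_outliers split_outliers split_outliers_alt
  have hs : (PySem.List.sorted numbers (fun x => x) false).Pairwise (· ≤ ·) :=
    PySem.List.sorted_pairwise numbers (fun x => x)
  set ns := PySem.List.sorted numbers (fun x => x) false with hns
  by_cases hn : ns.length < 10
  · simp [hn]
  · simp only [if_neg hn]
    set n := ns.length with hlen
    have e1 : PySem.List.pyGetD ns (PySem.Int.floordiv (n : Int) 4) 0 = ns.getD (n / 4) 0 := by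
      rw [floordiv_nat4 n, PySem.List.pyGetD_natCast]
    have e3 : PySem.List.pyGetD ns (PySem.Int.floordiv ((n : Int) * 3) 4) 0 = ns.getD (n * 3 / 4) 0 := by
      rw [show ((n : Int) * 3) = ((n * 3 : Nat) : Int) by push_cast; ring,
          floordiv_nat4 (n * 3), PySem.List.pyGetD_natCast]
    rw [e1, e3]
    set q1 := ns.getD (n / 4) 0 with hq1
    set q3 := ns.getD (n * 3 / 4) 0 with hq3
    have hq13 : q1 ≤ q3 := getD_mono ns hs (n / 4) (n * 3 / 4) (by omega) (by omega)
    set mn := q1 - 15 * (q3 - q1) with hmn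
    set mx := q3 + 15 * (q3 - q1) with hmx
    have hmm : mn ≤ mx := by omega
    have hdown1 : ∀ a b : Int, a ≤ b → (fun v => decide (v < mn)) b = true →
        (fun v => decide (v < mn)) a = true := by
      intro a b hab h
      simp only [decide_eq_true_eq] at *
      omega
    have hdown2 : ∀ a b : Int, a ≤ b → (fun v => decide (v ≤ mx)) b = true →
        (fun v => decide (v ≤ mx)) a = true := by
      intro a b hab h
      simp only [decide_eq_true_eq] at *
      omega
    have himp : ∀ x : Int, (fun v => decide (v < mn)) x = true →
        (fun v => decide (v ≤ mx)) x = true := by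
      intro x h
      simp only [decide_eq_true_eq] at *
      omega
    rw [boundary_eq _ hdown1 ns hs, boundary_eq _ hdown2 ns hs]
    set c1 := ns.countP (fun v => decide (v < mn)) with hc1
    set c2 := ns.countP (fun v => decide (v ≤ mx)) with hc2
    have hsplit := countP_or_split _ _ himp ns
    rw [PySem.List.slice_natCast, PySem.List.slice_to_natCast, PySem.List.slice_from_natCast]
    obtain ⟨ht1, hd1⟩ := take_countP_of_sorted _ hdown1 ns hs
    obtain ⟨ht2, hd2⟩ := take_countP_of_sorted _ hdown2 ns hs
    simp only [Prod.mk.injEq]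
    constructor
    · -- inliers
      rw [hd1]
      have hts : (ns.filter (fun x => !(decide (x < mn)))).Pairwise (· ≤ ·) := hs.filter _
      have hcnt : (ns.filter (fun x => !(decide (x < mn)))).countP (fun v => decide (v ≤ mx))
          = c2 - c1 := by
        rw [List.countP_filter]
        omega
      have htake := (take_countP_of_sorted _ hdown2 _ hts).1
      rw [hcnt] at htake
      rw [htake, List.filter_filter]
      apply List.filter_congr
      intro x _
      by_cases h1 : mn ≤ x <;> by_cases h2 : x ≤ mx <;> simp [h1, h2] <;> omega
    · -- outliers
      rw [ht1, hd2]
      have hdisj : ∀ x : Int, (fun v => decide (v < mn)) x = true →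
          (fun x => !(decide (x ≤ mx))) x = true → False := by
        intro x h1 h2
        simp only [decide_eq_true_eq, Bool.not_eq_true', decide_eq_false_iff_not] at *
        omega
      have := filter_or_append (fun v => decide (v < mn)) (fun x => !(decide (x ≤ mx)))
        hdown1 (by
          intro x h1
          by_cases h2 : (fun x => !(decide (x ≤ mx))) x = true
          · exact absurd (hdisj x h1 h2) (by simp)
          · simpa using h2) ns hs
      rw [← this]
      apply List.filter_congr
      intro x _
      by_cases h1 : x < mn <;> by_cases h2 : mx < x <;> simp [h1, h2] <;> omega
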